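-- pv_equiv track=rewrite | github.com/pqnguyen/CompetitiveProgramming | platforms/interviewbit/NobleInteger.py | solve
-- ===== SOURCE A (Python) =====
-- def solve(A):
--     if not A: return -1
--     A.sort()
--     n = len(A)
--     for i in range(n - 1, -1, -1):
--         if (i == n - 1 or A[i] < A[i + 1]) and A[i] == n - i - 1:
--             return 1
--     return -1
-- ===== SOURCE B (Python) =====
-- def solve(A):
--     # Counting approach: bucket values into [0, n) and scan once with a
--     # running prefix count; no sort. (Unlike A, does not mutate A.)
--     if not A:
--         return -1
--     n = len(A)
--     cnt = [0] * n
--     neg = 0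
--     for x in A:
--         if 0 <= x < n:
--             cnt[x] += 1
--         elif x < 0:
--             neg += 1
--     le = neg
--     for v in range(n):
--         le += cnt[v]
--         if cnt[v] and n - le == v:
--             return 1
--     return -1
-- ===== Notes on version B (the rewrite author's own statement) =====
-- stated objective: faster
-- what changed: Replaces A's sort + reverse index scan (O(n log n)) by a counting pass that buckets values into the candidate range [0, n) plus one prefix-count scan, O(n) with no sort and no mutation of the input.
import Mathlib
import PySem

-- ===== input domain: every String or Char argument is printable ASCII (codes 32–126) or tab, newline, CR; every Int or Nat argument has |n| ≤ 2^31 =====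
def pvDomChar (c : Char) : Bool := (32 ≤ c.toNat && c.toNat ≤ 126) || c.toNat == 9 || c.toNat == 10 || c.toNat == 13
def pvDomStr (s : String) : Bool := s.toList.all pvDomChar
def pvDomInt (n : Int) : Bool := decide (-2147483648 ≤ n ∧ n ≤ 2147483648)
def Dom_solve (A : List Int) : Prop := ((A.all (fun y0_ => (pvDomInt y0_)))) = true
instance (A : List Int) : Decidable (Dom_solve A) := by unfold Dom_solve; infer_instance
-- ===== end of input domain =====

-- B replaces A's sort + reverse index scan by a counting pass over the candidate value
-- range [0, n) plus one prefix-count scan (a different, linear-time algorithm).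
-- The equivalence is about the RETURN value only: Python A sorts its argument in place, B does not.

-- ===== PORT A =====
-- A's loop 'for i in range(n-1, -1, -1): if …: return 1', falling through to -1.
-- Indices are in range wherever they are read (the 'or' short-circuits at i = n-1),
-- so pyGetD's default 0 is never the value used.
def solveLoopA (s : List Int) (n : Int) : List Int → Int
  | [] => -1
  | i :: rest =>
    if ((i == n - 1) || decide (PySem.List.pyGetD s i 0 < PySem.List.pyGetD s (i + 1) 0))
        && (PySem.List.pyGetD s i 0 == n - i - 1) then 1
    else solveLoopA s n rest

def solve (A : List Int) : Int :=
  if A = [] then -1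
  else
    let s := PySem.List.sorted A (fun x => x) false
    let n : Int := s.length
    solveLoopA s n (PySem.List.pyRange (n - 1) (-1) (-1))

-- ===== PORT B =====
-- first pass of Source B: bucket x into cnt[x] for 0 ≤ x < n, count negatives in neg
def solveBStep (n : Int) (st : List Int × Int) (x : Int) : List Int × Int :=
  if 0 ≤ x ∧ x < n then (PySem.List.pySetD st.1 x (PySem.List.pyGetD st.1 x 0 + 1), st.2)
  else if x < 0 then (st.1, st.2 + 1)
  else st

-- second pass of Source B: 'for v in range(n): le += cnt[v]; if cnt[v] and n - le == v: return 1'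
def solveLoopB (n : Int) (cnt : List Int) : List Int → Int → Int
  | [], _ => -1
  | v :: rest, le =>
    let le' := le + PySem.List.pyGetD cnt v 0
    if (PySem.List.pyGetD cnt v 0 != 0) && (n - le' == v) then 1
    else solveLoopB n cnt rest le'

def solve_alt (A : List Int) : Int :=
  if A = [] then -1
  else
    let n : Int := A.length
    let st := A.foldl (solveBStep n) (List.replicate A.length 0, 0)
    solveLoopB n st.1 (PySem.List.pyRange 0 n 1) st.2

-- ===== PRECONDITION & SPEC =====
def Spec_solve (A : List Int) (out : Int) : Prop := out = solve_alt A
instance (A : List Int) (out : Int) : Decidable (Spec_solve A out) := by unfold Spec_solve; infer_instance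

-- ===== CLAIM (what is proved, stated in full; the proofs are below) =====
def Claim_equal_solve : Prop := ∀ (A : List Int), Dom_solve A → Spec_solve A (solve A)

-- ===== LEMMAS AND PROOFS =====

-- 'A has a noble integer': some x ∈ A has exactly x elements of A strictly greater than it
def nobleb (A : List Int) : Bool :=
  A.any (fun x => ((A.countP fun y => decide (x < y) : Nat) : Int) == x)

-- a sorted list is index-monotone
lemma sorted_getElem_le {s : List Int} (hs : s.Pairwise (· ≤ ·)) {i j : Nat}
    (hij : i ≤ j) (hj : j < s.length) : s[i]'(lt_of_le_of_lt hij hj) ≤ s[j] := by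
  rcases eq_or_lt_of_le hij with rfl | h
  · exact le_refl _
  · exact List.pairwise_iff_getElem.mp hs i j (by omega) hj h

-- an element of A never counts itself as greater
lemma countP_gt_lt_length {A : List Int} {x : Int} (hx : x ∈ A) :
    A.countP (fun y => decide (x < y)) < A.length := by
  have h1 : 0 < A.countP (fun y => decide (¬ (decide (x < y)) = true)) := by
    rw [List.countP_pos_iff]
    exact ⟨x, hx, by simp⟩
  have h2 := List.length_eq_countP_add_countP (p := fun y : Int => decide (x < y)) (l := A)
  omega

lemma getD_at {l : List Int} {k : Nat} (h : k < l.length) : l.getD k 0 = l[k] := by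
  rw [List.getD_eq_getElem?_getD, List.getElem?_eq_getElem h]
  rfl

lemma countP_lt_succ (A : List Int) (v : Int) :
    A.countP (fun x => decide (x < v + 1)) = A.countP (fun x => decide (x < v)) + A.count v := by
  induction A with
  | nil => simp
  | cons a l ih =>
    simp only [List.countP_cons, List.count_cons, ih]
    by_cases h1 : a < v + 1 <;> by_cases h2 : a < v <;> by_cases h3 : a = v <;>
      simp [h1, h2, h3, beq_iff_eq] <;> omega

-- FORWARD: the condition A checks at a valid index counts the strictly-greater elements
lemma count_gt_at {s : List Int} (hs : s.Pairwise (· ≤ ·)) (k : Nat) (hk : k < s.length)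
    {x : Int} (hx : s[k] = x)
    (hd : k + 1 = s.length ∨ x < s.getD (k + 1) 0) :
    s.countP (fun y => decide (x < y)) = s.length - (k + 1) := by
  have key := List.countP_append (p := fun y : Int => decide (x < y))
    (l₁ := s.take (k+1)) (l₂ := s.drop (k+1))
  rw [List.take_append_drop] at key
  have h1 : (s.take (k+1)).countP (fun y => decide (x < y)) = 0 := by
    rw [List.countP_eq_zero]
    intro a ha
    obtain ⟨j, hj, rfl⟩ := List.mem_iff_getElem.mp ha
    have hjk : j ≤ k := by rw [List.length_take] at hj; omega
    have hle := sorted_getElem_le hs hjk hk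
    rw [hx] at hle
    simp only [List.getElem_take, decide_eq_true_eq]
    omega
  have h2 : (s.drop (k+1)).countP (fun y => decide (x < y)) = (s.drop (k+1)).length := by
    rw [List.countP_eq_length]
    intro a ha
    obtain ⟨j, hj, rfl⟩ := List.mem_iff_getElem.mp ha
    rw [List.length_drop] at hj
    rcases hd with hlast | hlt
    · omega
    · have hk1 : k + 1 < s.length := by omega
      have hgd : s.getD (k+1) 0 = s[k+1] := getD_at hk1
      rw [hgd] at hlt
      have hle := sorted_getElem_le hs (i := k+1) (j := k+1+j) (by omega) (by omega)
      rw [List.getElem_drop]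
      simp only [decide_eq_true_eq]
      omega
  rw [key, h1, h2, List.length_drop]
  omega

-- BACKWARD: a noble x of a sorted s sits at index n-1-c and passes A's check
lemma noble_to_index {s : List Int} (hs : s.Pairwise (· ≤ ·)) {x : Int} (hx : x ∈ s)
    (hc : ((s.countP fun y => decide (x < y) : Nat) : Int) = x) :
    ∃ k : Nat, ∃ hk : k < s.length, s[k] = x ∧
      (k + 1 = s.length ∨ x < s.getD (k + 1) 0) ∧ ((s.length : Int)) - k - 1 = x := by
  have hclen : s.countP (fun y => decide (x < y)) < s.length := countP_gt_lt_length hx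
  have hlen0 : 0 < s.length := List.length_pos_of_mem hx
  set c := s.countP (fun y => decide (x < y)) with hcdef
  have hk : s.length - 1 - c < s.length := by omega
  have hub : ¬ x < s[s.length - 1 - c]'hk := by
    intro hlt
    have hall : (s.drop (s.length - 1 - c)).countP (fun y => decide (x < y))
        = (s.drop (s.length - 1 - c)).length := by
      rw [List.countP_eq_length]
      intro a ha
      obtain ⟨j, hj, rfl⟩ := List.mem_iff_getElem.mp ha
      rw [List.length_drop] at hj
      have hmono := sorted_getElem_le hs (i := s.length - 1 - c)
        (j := s.length - 1 - c + j) (by omega) (by omega)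
      rw [List.getElem_drop]
      simp only [decide_eq_true_eq]
      omega
    have hsplit := List.countP_append (p := fun y : Int => decide (x < y))
      (l₁ := s.take (s.length - 1 - c)) (l₂ := s.drop (s.length - 1 - c))
    rw [List.take_append_drop, ← hcdef] at hsplit
    rw [List.length_drop] at hall
    omega
  have hlb : ¬ s[s.length - 1 - c]'hk < x := by
    intro hlt
    obtain ⟨j0, hj0, hj0x⟩ := List.mem_iff_getElem.mp hx
    have hj0k : s.length - 1 - c < j0 := by
      by_contra hle
      rw [not_lt] at hle
      have hmono := sorted_getElem_le hs hle hk
      rw [hj0x] at hmono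
      omega
    have htake : (s.take (s.length - 1 - c + 1)).countP (fun y => decide (x < y)) = 0 := by
      rw [List.countP_eq_zero]
      intro a ha
      obtain ⟨j, hj, rfl⟩ := List.mem_iff_getElem.mp ha
      have hjk : j ≤ s.length - 1 - c := by rw [List.length_take] at hj; omega
      have hmono := sorted_getElem_le hs hjk hk
      simp only [List.getElem_take, decide_eq_true_eq]
      omega
    have hsplit := List.countP_append (p := fun y : Int => decide (x < y))
      (l₁ := s.take (s.length - 1 - c + 1)) (l₂ := s.drop (s.length - 1 - c + 1))
    rw [List.take_append_drop, ← hcdef] at hsplit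
    have hxd : x ∈ s.drop (s.length - 1 - c + 1) := by
      rw [List.mem_iff_getElem]
      refine ⟨j0 - (s.length - 1 - c + 1), ?_, ?_⟩
      · rw [List.length_drop]; omega
      · rw [List.getElem_drop]
        have hidx : s.length - 1 - c + 1 + (j0 - (s.length - 1 - c + 1)) = j0 := by omega
        simp only [hidx]
        exact hj0x
    have hfail : 0 < (s.drop (s.length - 1 - c + 1)).countP
        (fun y => decide (¬ (decide (x < y)) = true)) := by
      rw [List.countP_pos_iff]
      exact ⟨x, hxd, by simp⟩
    have hlen2 := List.length_eq_countP_add_countP (p := fun y : Int => decide (x < y))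
      (l := s.drop (s.length - 1 - c + 1))
    rw [List.length_drop] at hlen2
    omega
  have hkx : s[s.length - 1 - c]'hk = x := le_antisymm (not_lt.mp hub) (not_lt.mp hlb)
  have hdist : (s.length - 1 - c) + 1 = s.length ∨ x < s.getD ((s.length - 1 - c) + 1) 0 := by
    by_cases hlast : s.length - 1 - c + 1 = s.length
    · exact Or.inl hlast
    · right
      have hk1 : s.length - 1 - c + 1 < s.length := by omega
      rw [getD_at hk1]
      by_contra hle
      rw [not_lt] at hle
      have htake : (s.take (s.length - 1 - c + 2)).countP (fun y => decide (x < y)) = 0 := by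
        rw [List.countP_eq_zero]
        intro a ha
        obtain ⟨j, hj, rfl⟩ := List.mem_iff_getElem.mp ha
        have hjk : j ≤ s.length - 1 - c + 1 := by rw [List.length_take] at hj; omega
        have hmono := sorted_getElem_le hs hjk hk1
        simp only [List.getElem_take, decide_eq_true_eq]
        omega
      have hsplit := List.countP_append (p := fun y : Int => decide (x < y))
        (l₁ := s.take (s.length - 1 - c + 2)) (l₂ := s.drop (s.length - 1 - c + 2))
      rw [List.take_append_drop, ← hcdef] at hsplit
      have hdle := List.countP_le_length (p := fun y : Int => decide (x < y))
        (l := s.drop (s.length - 1 - c + 2))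
      rw [List.length_drop] at hdle
      omega
  exact ⟨s.length - 1 - c, hk, hkx, hdist, by omega⟩

lemma loopA_eq_any (s : List Int) (n : Int) (l : List Int) :
    solveLoopA s n l =
      (if l.any (fun i =>
          ((i == n - 1) || decide (PySem.List.pyGetD s i 0 < PySem.List.pyGetD s (i + 1) 0))
            && (PySem.List.pyGetD s i 0 == n - i - 1)) then 1 else -1) := by
  induction l with
  | nil => simp [solveLoopA]
  | cons i rest ih =>
    by_cases h : (((i == n - 1) || decide (PySem.List.pyGetD s i 0 < PySem.List.pyGetD s (i + 1) 0))
        && (PySem.List.pyGetD s i 0 == n - i - 1)) = true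
    · simp [solveLoopA, h]
    · simp only [solveLoopA]
      rw [if_neg (by simp [h]), ih]
      simp [h]

lemma A_char (A : List Int) (h : ¬ A = []) :
    solve A = if nobleb A then 1 else -1 := by
  simp only [solve]
  rw [if_neg h, loopA_eq_any]
  have hperm : (PySem.List.sorted A (fun x => x) false).Perm A :=
    PySem.List.sorted_perm A (fun x => x) false
  have hpw : (PySem.List.sorted A (fun x => x) false).Pairwise (· ≤ ·) :=
    PySem.List.sorted_pairwise A (fun x => x)
  set s := PySem.List.sorted A (fun x => x) false with hsdef
  have key : (PySem.List.pyRange ((s.length : Int) - 1) (-1) (-1)).any (fun i =>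
      ((i == (s.length : Int) - 1) ||
          decide (PySem.List.pyGetD s i 0 < PySem.List.pyGetD s (i + 1) 0))
        && (PySem.List.pyGetD s i 0 == (s.length : Int) - i - 1)) = nobleb A := by
    rw [Bool.eq_iff_iff]
    simp only [List.any_eq_true, PySem.List.mem_pyRange_neg_one]
    constructor
    · rintro ⟨i, ⟨hi1, hi2⟩, hC⟩
      have hi0 : 0 ≤ i := by omega
      have hklt : i.toNat < s.length := by omega
      simp only [Bool.and_eq_true, Bool.or_eq_true, beq_iff_eq, decide_eq_true_eq] at hC
      obtain ⟨hC1, hC2⟩ := hC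
      have hg1 : PySem.List.pyGetD s i 0 = s[i.toNat] :=
        PySem.List.pyGetD_eq_getElem s 0 hi0 (by omega)
      rw [hg1] at hC1 hC2
      have hd : i.toNat + 1 = s.length ∨ s[i.toNat] < s.getD (i.toNat + 1) 0 := by
        rcases hC1 with he | hlt
        · left; omega
        · by_cases hlast : i.toNat + 1 = s.length
          · exact Or.inl hlast
          · right
            have hg2 : PySem.List.pyGetD s (i + 1) 0 = s[(i+1).toNat] :=
              PySem.List.pyGetD_eq_getElem s 0 (by omega) (by omega)
            rw [hg2] at hlt
            have hidx : (i+1).toNat = i.toNat + 1 := by omega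
            rw [getD_at (by omega)]
            simp only [hidx] at hlt
            exact hlt
      have hcount := count_gt_at hpw i.toNat hklt rfl hd
      simp only [nobleb, List.any_eq_true, beq_iff_eq]
      refine ⟨s[i.toNat], hperm.mem_iff.mp (List.getElem_mem hklt), ?_⟩
      rw [← hperm.countP_eq, hcount]
      omega
    · intro hN
      simp only [nobleb, List.any_eq_true, beq_iff_eq] at hN
      obtain ⟨x, hxA, hxc⟩ := hN
      have hxs : x ∈ s := hperm.mem_iff.mpr hxA
      have hxc' : ((s.countP fun y => decide (x < y) : Nat) : Int) = x := by
        rw [hperm.countP_eq]; exact hxc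
      obtain ⟨k, hk, hkx, hd, hval⟩ := noble_to_index hpw hxs hxc'
      refine ⟨(k : Int), ⟨by omega, by omega⟩, ?_⟩
      simp only [Bool.and_eq_true, Bool.or_eq_true, beq_iff_eq, decide_eq_true_eq]
      have hg1 : PySem.List.pyGetD s ((k : Int)) 0 = s[k] := by
        have := PySem.List.pyGetD_eq_getElem s (i := (k : Int)) 0 (by omega) (by omega)
        simpa using this
      constructor
      · rcases hd with hlast | hlt
        · left; omega
        · right
          have hcast : ((k : Int) + 1) = (((k+1 : Nat)) : Int) := by push_cast; ring
          rw [hg1, hcast, PySem.List.pyGetD_natCast, hkx]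
          exact hlt
      · rw [hg1, hkx]; omega
  rw [key]

-- the first pass of B computes the per-value counts and the number of negatives
lemma foldB (n : Int) (l : List Int) (cnt : List Int) (neg : Int)
    (hlen : (cnt.length : Int) = n) :
    (l.foldl (solveBStep n) (cnt, neg)).1.length = cnt.length ∧
    (l.foldl (solveBStep n) (cnt, neg)).2 = neg + (l.countP (fun x => decide (x < 0)) : Int) ∧
    ∀ v : Nat, v < cnt.length →
      (l.foldl (solveBStep n) (cnt, neg)).1.getD v 0 = cnt.getD v 0 + (l.count (v : Int) : Int) := by
  induction l generalizing cnt neg with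
  | nil => simp
  | cons x t ih =>
    simp only [List.foldl_cons]
    by_cases h1 : 0 ≤ x ∧ x < n
    · have hxlt : x.toNat < cnt.length := by omega
      have hstep : solveBStep n (cnt, neg) x
          = (cnt.set x.toNat (cnt.getD x.toNat 0 + 1), neg) := by
        simp only [solveBStep, if_pos h1]
        rw [PySem.List.pySetD_of_nonneg _ _ h1.1,
            PySem.List.pyGetD_eq_getElem _ _ h1.1 (by omega), ← getD_at hxlt]
      rw [hstep]
      have hlen' : (((cnt.set x.toNat (cnt.getD x.toNat 0 + 1)).length : Nat) : Int) = n := by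
        simpa using hlen
      obtain ⟨ih1, ih2, ih3⟩ := ih (cnt.set x.toNat (cnt.getD x.toNat 0 + 1)) neg hlen'
      refine ⟨by rw [ih1]; simp, ?_, ?_⟩
      · rw [ih2]
        have hx0 : ¬ (x < 0) := by omega
        simp [hx0]
      · intro v hv
        rw [ih3 v (by simpa using hv)]
        by_cases hvx : x = (v : Int)
        · have hxv : x.toNat = v := by omega
          rw [hxv, List.getD_eq_getElem?_getD, List.getElem?_set_self (by omega)]
          rw [List.getD_eq_getElem?_getD (l := cnt)]
          simp [hvx]
          ring
        · have hne : x.toNat ≠ v := by omega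
          rw [List.getD_eq_getElem?_getD, List.getElem?_set_ne hne,
              ← List.getD_eq_getElem?_getD]
          simp [hvx]
    · by_cases h2 : x < 0
      · have hstep : solveBStep n (cnt, neg) x = (cnt, neg + 1) := by
          simp only [solveBStep, if_neg h1, if_pos h2]
        rw [hstep]
        obtain ⟨ih1, ih2, ih3⟩ := ih cnt (neg + 1) hlen
        refine ⟨ih1, ?_, ?_⟩
        · rw [ih2]
          simp [h2]
          ring
        · intro v hv
          rw [ih3 v hv]
          have hne : ¬ (x = (v : Int)) := by omega
          simp [hne]
      · have hstep : solveBStep n (cnt, neg) x = (cnt, neg) := by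
          simp only [solveBStep, if_neg h1, if_neg h2]
        rw [hstep]
        obtain ⟨ih1, ih2, ih3⟩ := ih cnt neg hlen
        refine ⟨ih1, ?_, ?_⟩
        · rw [ih2]
          simp [h2]
        · intro v hv
          rw [ih3 v hv]
          have hne : ¬ (x = (v : Int)) := by omega
          simp [hne]

-- the second pass of B finds a value u ∈ [v,n) occurring in A with #(> u) = u
def hasNobleFrom (A : List Int) (v : Nat) : Bool :=
  (List.range A.length).any (fun u => (decide (v ≤ u) && decide (0 < A.count ((u : Int))))
    && (((A.countP fun y => decide ((u : Int) < y) : Nat) : Int) == (u : Int)))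

lemma hasNobleFrom_iff (A : List Int) (v : Nat) :
    hasNobleFrom A v = true ↔ ∃ u : Nat, v ≤ u ∧ u < A.length ∧ 0 < A.count ((u : Int)) ∧
      ((A.countP fun y => decide ((u : Int) < y) : Nat) : Int) = (u : Int) := by
  simp only [hasNobleFrom, List.any_eq_true, List.mem_range, Bool.and_eq_true,
    decide_eq_true_eq, beq_iff_eq]
  constructor
  · rintro ⟨u, h1, ⟨h2, h3⟩, h4⟩
    exact ⟨u, h2, h1, h3, h4⟩
  · rintro ⟨u, h2, h1, h3, h4⟩
    exact ⟨u, h1, ⟨h2, h3⟩, h4⟩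

lemma loopB_char (A : List Int) (cnt : List Int)
    (hc : ∀ u : Nat, u < A.length → cnt.getD u 0 = (A.count (u : Int) : Int)) :
    ∀ v : Nat, v ≤ A.length →
    solveLoopB (A.length : Int) cnt (PySem.List.pyRange (v : Int) (A.length : Int) 1)
        ((A.countP (fun x => decide (x < (v : Int))) : Int)) =
      if hasNobleFrom A v then 1 else -1 := by
  intro v hv
  induction hfuel : A.length - v generalizing v with
  | zero =>
    have hveq : v = A.length := by omega
    subst hveq
    rw [PySem.List.pyRange_one_eq_nil (by omega)]
    simp only [solveLoopB]
    rw [if_neg]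
    intro hh
    obtain ⟨u, h1, h2, -⟩ := (hasNobleFrom_iff A A.length).mp hh
    omega
  | succ m ihm =>
    have hvlt : v < A.length := by omega
    rw [PySem.List.pyRange_one_cons (by exact_mod_cast hvlt)]
    simp only [solveLoopB, PySem.List.pyGetD_natCast]
    rw [hc v hvlt]
    have hsucc := countP_lt_succ A ((v : Int))
    have hcomp : A.countP (fun y => decide ((v : Int) < y))
        + A.countP (fun x => decide (x < (v : Int) + 1)) = A.length := by
      have h0 := List.length_eq_countP_add_countP
        (p := fun x : Int => decide (x < (v : Int) + 1)) (l := A)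
      have h1 : A.countP (fun x => decide (¬ (decide (x < (v : Int) + 1)) = true))
          = A.countP (fun y => decide ((v : Int) < y)) := by
        apply List.countP_congr
        intro a _
        simp only [decide_eq_true_eq]
        omega
      omega
    by_cases hyes : 0 < A.count ((v : Int)) ∧
        ((A.countP fun y => decide ((v : Int) < y) : Nat) : Int) = (v : Int)
    · rw [if_pos, if_pos ((hasNobleFrom_iff A v).mpr ⟨v, le_refl v, hvlt, hyes.1, hyes.2⟩)]
      simp only [Bool.and_eq_true, bne_iff_ne, ne_eq, beq_iff_eq]
      constructor
      · have := hyes.1; omega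
      · have := hyes.2; omega
    · rw [if_neg]
      · have IH := ihm (v + 1) (by omega) (by omega)
        push_cast at IH
        rw [countP_lt_succ A ((v : Int))] at IH
        push_cast at IH
        rw [IH]
        have hiff : (hasNobleFrom A (v + 1) = true) ↔ (hasNobleFrom A v = true) := by
          rw [hasNobleFrom_iff, hasNobleFrom_iff]
          constructor
          · rintro ⟨u, h1, h2, h3, h4⟩
            exact ⟨u, by omega, h2, h3, h4⟩
          · rintro ⟨u, h1, h2, h3, h4⟩
            refine ⟨u, ?_, h2, h3, h4⟩
            rcases Nat.eq_or_lt_of_le h1 with rfl | hlt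
            · exact absurd ⟨h3, h4⟩ hyes
            · omega
        rw [if_congr hiff rfl rfl]
      · simp only [Bool.and_eq_true, bne_iff_ne, ne_eq, beq_iff_eq, not_and]
        intro hcount heq
        exact hyes ⟨by omega, by omega⟩

-- the two characterisations coincide: B scans exactly the candidates 0 ≤ u < n
lemma hasNobleFrom_zero (A : List Int) : hasNobleFrom A 0 = nobleb A := by
  rw [Bool.eq_iff_iff, hasNobleFrom_iff]
  simp only [nobleb, List.any_eq_true, beq_iff_eq]
  constructor
  · rintro ⟨u, -, -, hcu, hcp⟩
    exact ⟨(u : Int), List.count_pos_iff.mp hcu, hcp⟩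
  · rintro ⟨x, hx, hxc⟩
    have hnn : (0 : Int) ≤ ((A.countP fun y => decide (x < y) : Nat) : Int) :=
      Int.natCast_nonneg _
    have hx0 : 0 ≤ x := by omega
    have hlt := countP_gt_lt_length hx
    have hxt : ((x.toNat : Nat) : Int) = x := by omega
    refine ⟨x.toNat, by omega, by omega, ?_, ?_⟩
    · rw [hxt]; exact List.count_pos_iff.mpr hx
    · rw [hxt]; exact hxc

lemma B_char (A : List Int) (h : ¬ A = []) :
    solve_alt A = if nobleb A then 1 else -1 := by
  simp only [solve_alt]
  rw [if_neg h]
  obtain ⟨h1, h2, h3⟩ := foldB ((A.length : Int)) A (List.replicate A.length 0) 0 (by simp)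
  rw [h2, zero_add]
  have hcv : ∀ u : Nat, u < A.length →
      (A.foldl (solveBStep ((A.length : Int))) (List.replicate A.length 0, 0)).1.getD u 0
        = (A.count ((u : Int)) : Int) := by
    intro u hu
    rw [h3 u (by simpa using hu)]
    simp [List.getD_eq_getElem?_getD, hu]
  have hmain := loopB_char A _ hcv 0 (by omega)
  push_cast at hmain
  rw [hmain, hasNobleFrom_zero]

-- ===== VERDICT (by name: the statement is the Claim_ definition above) =====
theorem solve_spec : Claim_equal_solve := by
  intro A _
  unfold Spec_solve
  by_cases h : A = []
  · simp [solve, solve_alt, h]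
  · rw [A_char A h, B_char A h]
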